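-- pv_equiv track=rewrite | github.com/zhenfelix/OnlineJudgeCodings | LeetCode/3814. Maximum Capacity Within Budget/solution.py | maxCapacity
-- ===== SOURCE A (Python) =====
-- from typing import List
--
-- def maxCapacity(costs: List[int], capacity: List[int], budget: int) -> int:
--     arr = sorted(zip(costs, capacity))
--     n = len(arr)
--     pre = [0] * n
--     mx = ans = 0
--
--     for i, (c, cap) in enumerate(arr):
--         mx = max(mx, cap)
--         pre[i] = mx
--         if c < budget: ans = max(ans, cap)
--
--     j = 0
--     for i in range(n - 1, 0, -1):
--         while j < n and arr[j][0] + arr[i][0] < budget: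
--             j += 1
--         idx = min(j - 1, i - 1)
--         if idx >= 0:
--             ans = max(ans, arr[i][1] + pre[idx])
--
--     return ans
-- ===== SOURCE B (Python) =====
-- from typing import List
--
-- def maxCapacity(costs: List[int], capacity: List[int], budget: int) -> int:
--     # Same item order as A (sorted by (cost, capacity)).  Instead of A's
--     # prefix-max array filled by an enumerate pass plus a monotone two-pointer
--     # countdown sweep, B makes one streaming pass: for each item it binary
--     # searches the (sorted) costs of the items already seen for how many are
--     # affordable together with it, and pairs it with their running prefix
--     # maximum, maintained incrementally.  The prefix maximum starts at 0,
--     # following A's convention (A initialises mx = 0 before filling pre).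
--     arr = sorted(zip(costs, capacity))
--     best = 0
--     for c, cap in arr:
--         if c < budget:
--             best = max(best, cap)
--     seen_costs = []
--     prefmax = []
--     for c, cap in arr:
--         lo, hi = 0, len(seen_costs)
--         while lo < hi:
--             mid = (lo + hi) // 2
--             if seen_costs[mid] + c < budget:
--                 lo = mid + 1
--             else:
--                 hi = mid
--         if lo > 0:
--             best = max(best, cap + prefmax[lo - 1])
--         seen_costs.append(c)
--         prefmax.append(max(prefmax[-1] if prefmax else 0, cap))
--     return best
-- ===== Notes on version B (the rewrite author's own statement) =====
-- stated objective: alternative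
-- what changed: A's three-stage pipeline (enumerate pass filling a preallocated prefix-max array, then a stateful decreasing-i two-pointer sweep sharing one monotone pointer) is replaced by a single streaming pass: for each item a hand-written binary search over the sorted costs of the items already seen counts its affordable partners, and an incrementally grown prefix-max list supplies the best partner capacity.
import Mathlib
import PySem

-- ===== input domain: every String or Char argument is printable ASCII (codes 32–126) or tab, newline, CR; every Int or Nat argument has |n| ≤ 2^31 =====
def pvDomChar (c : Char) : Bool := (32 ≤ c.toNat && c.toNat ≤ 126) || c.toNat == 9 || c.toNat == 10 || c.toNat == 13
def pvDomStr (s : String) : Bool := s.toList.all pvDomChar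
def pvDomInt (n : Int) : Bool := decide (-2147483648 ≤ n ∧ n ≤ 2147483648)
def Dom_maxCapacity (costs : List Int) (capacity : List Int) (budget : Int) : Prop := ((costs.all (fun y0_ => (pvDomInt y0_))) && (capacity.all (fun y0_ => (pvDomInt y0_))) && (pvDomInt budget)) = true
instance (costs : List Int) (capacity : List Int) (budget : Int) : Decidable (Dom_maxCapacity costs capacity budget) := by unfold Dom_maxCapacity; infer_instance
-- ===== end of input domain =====

-- B keeps A's sorted item order but replaces the preallocated prefix-max array and
-- the two-pointer sweep by one streaming pass: a binary search over the costs seen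
-- so far counts affordable partners, a prefix-max list grown incrementally supplies
-- the best one (floored at 0, as A's pre array is); alternative, not faster.

-- ===== PORT A =====
-- 'while j < n and arr[j][0] + arr[i][0] < budget: j += 1'
def pvAdvance (arr : List (Int × Int)) (ci budget : Int) (j : Nat) : Nat :=
  if _h : j < arr.length then
    if (arr.getD j (0, 0)).1 + ci < budget then pvAdvance arr ci budget (j + 1) else j
  else j
termination_by arr.length - j

def maxCapacity (costs : List Int) (capacity : List Int) (budget : Int) : Int :=
  let arr := PySem.List.sorted2 (costs.zip capacity) Prod.fst Prod.snd
  let n := arr.length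
  let s1 := (PySem.List.enumerate arr 0).foldl
      (fun (s : List Int × Int × Int) e =>
        let mx := max s.2.1 e.2.2
        (PySem.List.pySetD s.1 e.1 mx, mx,
         if e.2.1 < budget then max s.2.2 e.2.2 else s.2.2))
      (List.replicate n 0, 0, 0)
  let pre := s1.1
  let s2 := (PySem.List.pyRange ((n : Int) - 1) 0 (-1)).foldl
      (fun (s : Nat × Int) i =>
        let j := pvAdvance arr (PySem.List.pyGetD arr i (0, 0)).1 budget s.1
        let idx := min ((j : Int) - 1) (i - 1)
        (j, if 0 ≤ idx then
              max s.2 ((PySem.List.pyGetD arr i (0, 0)).2 + PySem.List.pyGetD pre idx 0)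
            else s.2))
      (0, s1.2.2)
  s2.2

-- ===== PORT B =====
-- 'lo, hi = 0, len(seen_costs) / while lo < hi: mid = (lo + hi) // 2; ...'
def pvBisect (cs : List Int) (c budget : Int) (lo hi : Nat) : Nat :=
  if _h : lo < hi then
    let mid := (lo + hi) / 2
    -- seen_costs[mid]: the index is always in range here, so getD is exact
    if cs.getD mid 0 + c < budget then pvBisect cs c budget (mid + 1) hi
    else pvBisect cs c budget lo mid
  else lo
termination_by hi - lo

-- one streaming pass over the sorted items; state = (best, seen_costs, prefmax)
def maxCapacity_alt (costs : List Int) (capacity : List Int) (budget : Int) : Int :=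
  let arr := PySem.List.sorted2 (costs.zip capacity) Prod.fst Prod.snd
  let best := arr.foldl (fun b p => if p.1 < budget then max b p.2 else b) 0
  (arr.foldl
    (fun (s : Int × List Int × List Int) p =>
      let lo := pvBisect s.2.1 p.1 budget 0 s.2.1.length
      -- prefmax[lo - 1]: in range whenever lo > 0, so getD is exact
      let b2 := if 0 < lo then max s.1 (p.2 + s.2.2.getD (lo - 1) 0) else s.1
      (b2, s.2.1 ++ [p.1],
       s.2.2 ++ [max (if s.2.2.isEmpty then 0 else PySem.List.pyGetD s.2.2 (-1) 0) p.2]))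
    (best, [], [])).1

-- ===== PRECONDITION & SPEC =====
def Spec_maxCapacity (costs : List Int) (capacity : List Int) (budget : Int) (out : Int) : Prop := out = maxCapacity_alt costs capacity budget
instance (costs : List Int) (capacity : List Int) (budget : Int) (out : Int) : Decidable (Spec_maxCapacity costs capacity budget out) := by unfold Spec_maxCapacity; infer_instance

-- ===== CLAIM (what is proved, stated in full; the proofs are below) =====
def Claim_equal_maxCapacity : Prop := ∀ (costs : List Int) (capacity : List Int) (budget : Int), Dom_maxCapacity costs capacity budget → Spec_maxCapacity costs capacity budget (maxCapacity costs capacity budget)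

-- ===== LEMMAS AND PROOFS =====

-- the number of elements of arr whose cost stays strictly under budget - ci:
-- A's advanced pointer lands on this value
def pvBnd (arr : List (Int × Int)) (budget ci : Int) : Nat :=
  (arr.takeWhile (fun p => decide (p.1 + ci < budget))).length

theorem pv_tw_le {α : Type} (p : α → Bool) (l : List α) :
    (l.takeWhile p).length ≤ l.length := by
  induction l with
  | nil => simp
  | cons a t ih => by_cases h : p a <;> simp [h] <;> omega

theorem pv_tw_true {α : Type} (p : α → Bool) (l : List α) (d : α) :
    ∀ i : Nat, i < (l.takeWhile p).length → p (l.getD i d) = true := by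
  induction l with
  | nil => simp
  | cons a t ih =>
    intro i hi
    by_cases h : p a
    · cases i with
      | zero => simp [h]
      | succ k =>
        simp only [List.takeWhile_cons, h, if_true, List.length_cons] at hi
        simpa using ih k (by omega)
    · simp [h] at hi

theorem pv_tw_false {α : Type} (p : α → Bool) (l : List α) (d : α)
    (h : (l.takeWhile p).length < l.length) :
    p (l.getD (l.takeWhile p).length d) = false := by
  induction l with
  | nil => simp at h
  | cons a t ih =>
    by_cases hp : p a
    · simp only [List.takeWhile_cons, hp, if_true, List.length_cons] at h ⊢
      simpa using ih (by omega)
    · simpa [List.takeWhile_cons, hp] using hp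

theorem pv_tw_mono {α : Type} (p q : α → Bool) (h : ∀ x, p x = true → q x = true)
    (l : List α) : (l.takeWhile p).length ≤ (l.takeWhile q).length := by
  induction l with
  | nil => simp
  | cons a t ih =>
    by_cases hp : p a
    · have hq := h a hp
      simp only [List.takeWhile_cons, hp, hq, if_true, List.length_cons]
      omega
    · simp [List.takeWhile_cons, hp]

theorem pv_bnd_le (arr : List (Int × Int)) (budget ci : Int) :
    pvBnd arr budget ci ≤ arr.length := pv_tw_le _ _

theorem pv_bnd_true (arr : List (Int × Int)) (budget ci : Int) (k : Nat)
    (hk : k < pvBnd arr budget ci) : (arr.getD k (0, 0)).1 + ci < budget := by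
  have hk' : k < (arr.takeWhile (fun p => decide (p.1 + ci < budget))).length := hk
  have := pv_tw_true (fun p => decide (p.1 + ci < budget)) arr (0, 0) k hk'
  simpa using this

theorem pv_bnd_false (arr : List (Int × Int)) (budget ci : Int)
    (h : pvBnd arr budget ci < arr.length) :
    ¬ (arr.getD (pvBnd arr budget ci) (0, 0)).1 + ci < budget := by
  have h' : (arr.takeWhile (fun p => decide (p.1 + ci < budget))).length < arr.length := h
  have := pv_tw_false (fun p => decide (p.1 + ci < budget)) arr (0, 0) h'
  simpa using this

theorem pv_bnd_anti (arr : List (Int × Int)) (budget ci ci' : Int) (h : ci ≤ ci') :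
    pvBnd arr budget ci' ≤ pvBnd arr budget ci := by
  refine pv_tw_mono _ _ (fun x hx => ?_) arr
  simp only [decide_eq_true_eq] at hx ⊢
  omega

-- A's while loop, started at or below the target pointer value, lands exactly on it
theorem pv_advance_eq (arr : List (Int × Int)) (ci budget : Int) :
    ∀ fuel j, arr.length - j ≤ fuel → j ≤ pvBnd arr budget ci →
      pvAdvance arr ci budget j = pvBnd arr budget ci := by
  intro fuel
  induction fuel with
  | zero =>
    intro j hf hj
    have hlen : arr.length ≤ j := by omega
    rw [pvAdvance, dif_neg (show ¬ j < arr.length by omega)]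
    have := pv_bnd_le arr budget ci; omega
  | succ f ih =>
    intro j hf hj
    rw [pvAdvance]
    by_cases hlt : j < arr.length
    · rw [dif_pos hlt]
      by_cases hp : (arr.getD j (0, 0)).1 + ci < budget
      · have hjb : j < pvBnd arr budget ci := by
          rcases Nat.lt_or_ge j (pvBnd arr budget ci) with h | h
          · exact h
          · have : j = pvBnd arr budget ci := by omega
            exact absurd hp (this ▸ pv_bnd_false arr budget ci (this ▸ hlt))
        simp only [hp, if_true]
        exact ih (j + 1) (by omega) (by omega)
      · simp only [hp, if_false]
        rcases Nat.lt_or_ge j (pvBnd arr budget ci) with h | h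
        · exact absurd (pv_bnd_true arr budget ci j h) hp
        · omega
    · rw [dif_neg hlt]
      have := pv_bnd_le arr budget ci; omega

-- Python's tuple sort is the sort by the lexicographic key
theorem pv_sorted2_eq (xs : List (Int × Int)) :
    PySem.List.sorted2 xs Prod.fst Prod.snd
      = PySem.List.sorted xs (fun p => toLex p) := by
  have hb : (fun (a b : Int × Int) =>
        decide (a.1 < b.1) || (!decide (b.1 < a.1) && decide (a.2 < b.2)))
      = (fun (a b : Int × Int) => decide (toLex a < toLex b)) := by
    funext a b
    by_cases h1 : a.1 < b.1 <;> by_cases h2 : b.1 < a.1 <;> by_cases h3 : a.2 < b.2 <;>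
      simp [h1, h2, h3, Prod.Lex.lt_iff] <;> omega
  simp only [PySem.List.sorted2, PySem.List.sorted]
  rw [hb]
  rfl

theorem pv_arr_mono (xs : List (Int × Int)) :
    ∀ k l : Nat, k ≤ l → l < (PySem.List.sorted2 xs Prod.fst Prod.snd).length →
      ((PySem.List.sorted2 xs Prod.fst Prod.snd).getD k (0, 0)).1
        ≤ ((PySem.List.sorted2 xs Prod.fst Prod.snd).getD l (0, 0)).1 := by
  rw [pv_sorted2_eq]
  intro k l hk hl
  rcases Nat.eq_or_lt_of_le hk with rfl | hlt
  · exact le_refl _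
  · have hp := PySem.List.sorted_pairwise xs (fun p => toLex p)
    rw [List.pairwise_iff_getElem] at hp
    have := hp k l (by omega) hl hlt
    have hle : ((PySem.List.sorted xs (fun p => toLex p))[k]'(by omega)).1
        ≤ ((PySem.List.sorted xs (fun p => toLex p))[l]'hl).1 := by
      rcases Prod.Lex.le_iff.mp this with h | ⟨h, _⟩
      · exact le_of_lt h
      · exact le_of_eq h
    rw [List.getD_eq_getElem?_getD, List.getD_eq_getElem?_getD,
        List.getElem?_eq_getElem (by omega : k < (PySem.List.sorted xs (fun p => toLex p)).length),
        List.getElem?_eq_getElem hl]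
    simpa using hle

theorem pv_set_append {α : Type} (xs : List α) (x v : α) (ys : List α) :
    (xs ++ x :: ys).set xs.length v = xs ++ v :: ys := by
  induction xs with
  | nil => rfl
  | cons a t ih => simpa using ih

-- the prefix-max list A builds, as a structural recursion
def pvPreF (m0 : Int) : List (Int × Int) → List Int
  | [] => []
  | p :: t => (max m0 p.2) :: pvPreF (max m0 p.2) t

theorem pv_pre_general (l : List (Int × Int)) :
    ∀ (s0 : List Int) (m0 : Int),
      l.foldl (fun (s : List Int × Int) p => (s.1 ++ [max s.2 p.2], max s.2 p.2)) (s0, m0)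
        = (s0 ++ pvPreF m0 l, l.foldl (fun m p => max m p.2) m0) := by
  induction l with
  | nil => intro s0 m0; simp [pvPreF]
  | cons p t ih =>
    intro s0 m0
    simp only [List.foldl_cons, pvPreF]
    rw [ih (s0 ++ [max m0 p.2]) (max m0 p.2)]
    simp

theorem pv_preF_getD (l : List (Int × Int)) :
    ∀ (m0 : Int) (k : Nat), k < l.length →
      (pvPreF m0 l).getD k 0 = (l.take (k + 1)).foldl (fun m p => max m p.2) m0 := by
  induction l with
  | nil => intro m0 k hk; simp at hk
  | cons p t ih =>
    intro m0 k hk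
    cases k with
    | zero => simp [pvPreF]
    | succ k =>
      simp only [pvPreF, List.getD_cons_succ, List.take_succ_cons, List.foldl_cons]
      exact ih (max m0 p.2) k (by simpa using hk)

theorem pv_getD_eq (l : List (Int × Int)) (k : Nat) (h : k < l.length) :
    l.getD k (0, 0) = l[k] := by
  rw [List.getD_eq_getElem?_getD, List.getElem?_eq_getElem h]
  rfl

-- PHASE 1: A's enumerate/pySetD prefix-max loop, relative to an already-built prefix
theorem pv_loop1 (budget : Int) (l : List (Int × Int)) :
    ∀ (preB : List Int) (mx ans : Int),
    (PySem.List.enumerate l (preB.length : Int)).foldl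
        (fun (s : List Int × Int × Int) e =>
          let m := max s.2.1 e.2.2
          (PySem.List.pySetD s.1 e.1 m, m,
           if e.2.1 < budget then max s.2.2 e.2.2 else s.2.2))
        (preB ++ List.replicate l.length 0, mx, ans)
      = ((l.foldl (fun (s : List Int × Int) p => (s.1 ++ [max s.2 p.2], max s.2 p.2)) (preB, mx)).1,
         (l.foldl (fun (s : List Int × Int) p => (s.1 ++ [max s.2 p.2], max s.2 p.2)) (preB, mx)).2,
         l.foldl (fun a p => if p.1 < budget then max a p.2 else a) ans) := by
  induction l with
  | nil => intro preB mx ans; simp [PySem.List.enumerate_nil]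
  | cons p t ih =>
    intro preB mx ans
    rw [PySem.List.enumerate_cons]
    simp only [List.foldl_cons, List.length_cons]
    have hset : PySem.List.pySetD (preB ++ List.replicate (t.length + 1) 0)
        ((preB.length : Nat) : Int) (max mx p.2) = (preB ++ [max mx p.2]) ++ List.replicate t.length 0 := by
      rw [PySem.List.pySetD_natCast]
      show (preB ++ 0 :: List.replicate t.length 0).set preB.length (max mx p.2) = _
      rw [pv_set_append]
      simp
    rw [hset]
    have hlen : (preB.length : Int) + 1 = ((preB ++ [max mx p.2]).length : Int) := by
      simp
    rw [hlen, ih (preB ++ [max mx p.2]) (max mx p.2)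
      (if p.1 < budget then max ans p.2 else ans)]

-- A's second-loop body with the pointer value made explicit
def pvStep (arr : List (Int × Int)) (pre : List Int) (budget : Int) (ans : Int) (i : Int) : Int :=
  let lo := pvBnd arr budget (PySem.List.pyGetD arr i (0, 0)).1
  let idx := min ((lo : Int) - 1) (i - 1)
  if 0 ≤ idx then
    max ans ((PySem.List.pyGetD arr i (0, 0)).2 + PySem.List.pyGetD pre idx 0)
  else ans

-- PHASE 2: A's stateful sweep over the countdown range equals the stateless fold of pvStep
theorem pv_loop2 (arr : List (Int × Int)) (pre : List Int) (budget : Int) :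
    ∀ (m : Nat), m < arr.length → ∀ (j : Nat) (ans : Int),
      j ≤ pvBnd arr budget (arr.getD m (0, 0)).1 →
      (∀ k l : Nat, k ≤ l → l < arr.length →
        (arr.getD k (0, 0)).1 ≤ (arr.getD l (0, 0)).1) →
      ((PySem.List.pyRange (m : Int) 0 (-1)).foldl
          (fun (s : Nat × Int) i =>
            let j := pvAdvance arr (PySem.List.pyGetD arr i (0, 0)).1 budget s.1
            let idx := min ((j : Int) - 1) (i - 1)
            (j, if 0 ≤ idx then
                  max s.2 ((PySem.List.pyGetD arr i (0, 0)).2 + PySem.List.pyGetD pre idx 0)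
                else s.2))
          (j, ans)).2
        = (PySem.List.pyRange (m : Int) 0 (-1)).foldl (pvStep arr pre budget) ans := by
  intro m
  induction m with
  | zero =>
    intro _ j ans _ _
    rw [PySem.List.pyRange_neg_one_eq_nil (by simp)]
    simp
  | succ k ih =>
    intro hm j ans hj hmono
    rw [PySem.List.pyRange_neg_one_cons (by push_cast; omega)]
    simp only [List.foldl_cons]
    have hget : PySem.List.pyGetD arr (((k + 1 : Nat)) : Int) (0, 0) = arr.getD (k + 1) (0, 0) := by
      rw [PySem.List.pyGetD_natCast]
    rw [hget, pv_advance_eq arr _ budget arr.length j (by omega) hj]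
    have hc : ((k + 1 : Nat) : Int) - 1 = ((k : Nat) : Int) := by push_cast; ring
    rw [hc]
    have hnext : pvBnd arr budget (arr.getD (k + 1) (0, 0)).1
        ≤ pvBnd arr budget (arr.getD k (0, 0)).1 :=
      pv_bnd_anti arr budget _ _ (hmono k (k + 1) (by omega) hm)
    rw [ih (by omega) _ _ hnext hmono]
    congr 1
    simp only [pvStep, hget, hc]

-- pvStep is right-commutative, so the countdown fold may run upward instead
theorem pv_step_comm (arr : List (Int × Int)) (pre : List Int) (budget : Int)
    (x y : Int) (z : Int) :
    pvStep arr pre budget (pvStep arr pre budget z x) y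
      = pvStep arr pre budget (pvStep arr pre budget z y) x := by
  simp only [pvStep]
  split_ifs <;> first | rfl | exact max_right_comm _ _ _

theorem pv_reorder (arr : List (Int × Int)) (pre : List Int) (budget : Int)
    (m : Int) (ans : Int) :
    (PySem.List.pyRange m 0 (-1)).foldl (pvStep arr pre budget) ans
      = (PySem.List.pyRange 1 (m + 1) 1).foldl (pvStep arr pre budget) ans := by
  rw [PySem.List.pyRange_neg_one_eq_reverse]
  rw [show (0 : Int) + 1 = 1 by ring]
  exact List.Perm.foldl_eq' (List.reverse_perm _)
    (fun x _ y _ z => pv_step_comm arr pre budget x y z) ans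

theorem pv_step_zero (arr : List (Int × Int)) (pre : List Int) (budget : Int) (b : Int) :
    pvStep arr pre budget b 0 = b := by
  have h : min ((pvBnd arr budget (PySem.List.pyGetD arr 0 (0, 0)).1 : Int) - 1) ((0 : Int) - 1) < 0 := by
    have := min_le_right ((pvBnd arr budget (PySem.List.pyGetD arr 0 (0, 0)).1 : Int) - 1) ((0 : Int) - 1)
    omega
  simp only [pvStep]
  rw [if_neg (by omega)]

-- the binary search lands on m when the predicate holds exactly below m
theorem pv_bisect_eq (cs : List Int) (c budget : Int) (m : Nat)
    (htrue : ∀ j, j < m → cs.getD j 0 + c < budget)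
    (hfalse : ∀ j, m ≤ j → j < cs.length → ¬ cs.getD j 0 + c < budget) :
    ∀ fuel lo hi, hi - lo ≤ fuel → lo ≤ m → m ≤ hi → hi ≤ cs.length →
      pvBisect cs c budget lo hi = m := by
  intro fuel
  induction fuel with
  | zero =>
    intro lo hi hf h1 h2 h3
    rw [pvBisect, dif_neg (show ¬ lo < hi by omega)]
    omega
  | succ f ih =>
    intro lo hi hf h1 h2 h3
    rw [pvBisect]
    by_cases hlt : lo < hi
    · rw [dif_pos hlt]
      have hmid1 : lo ≤ (lo + hi) / 2 := by omega
      have hmid2 : (lo + hi) / 2 < hi := by omega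
      by_cases hp : cs.getD ((lo + hi) / 2) 0 + c < budget
      · simp only [hp, if_true]
        have hb : (lo + hi) / 2 < m := by
          rcases Nat.lt_or_ge ((lo + hi) / 2) m with h | h
          · exact h
          · exact absurd hp (hfalse _ h (by omega))
        exact ih ((lo + hi) / 2 + 1) hi (by omega) (by omega) h2 h3
      · simp only [hp, if_false]
        have hb : m ≤ (lo + hi) / 2 := by
          rcases Nat.lt_or_ge ((lo + hi) / 2) m with h | h
          · exact absurd (htrue _ h) hp
          · exact h
        exact ih lo ((lo + hi) / 2) (by omega) h1 hb (by omega)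
    · rw [dif_neg hlt]
      omega

theorem pv_getD_eqI (l : List Int) (k : Nat) (h : k < l.length) :
    l.getD k 0 = l[k] := by
  rw [List.getD_eq_getElem?_getD, List.getElem?_eq_getElem h]
  rfl

theorem pv_preF_snoc (l : List (Int × Int)) :
    ∀ (m0 : Int) (p : Int × Int),
      pvPreF m0 (l ++ [p]) = pvPreF m0 l ++ [max (l.foldl (fun m q => max m q.2) m0) p.2] := by
  induction l with
  | nil => intro m0 p; simp [pvPreF]
  | cons q t ih =>
    intro m0 p
    simp only [List.cons_append, pvPreF, List.foldl_cons]
    rw [ih (max m0 q.2) p]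

-- the last entry of the prefix-max list (0 when empty) is the running maximum
theorem pv_preF_last (l : List (Int × Int)) :
    (if (pvPreF 0 l).isEmpty then 0 else PySem.List.pyGetD (pvPreF 0 l) (-1) 0)
      = l.foldl (fun m q => max m q.2) 0 := by
  rcases List.eq_nil_or_concat l with rfl | ⟨l', p, rfl⟩
  · simp [pvPreF]
  · rw [List.concat_eq_append, pv_preF_snoc]
    simp [PySem.List.pyGetD_neg_one_append_singleton, List.foldl_append]

-- per-item equivalence: B's binary search over the seen costs plus the grown
-- prefix-max list computes exactly A's pvStep
theorem pv_index (arr : List (Int × Int)) (budget : Int)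
    (hmono : ∀ k l : Nat, k ≤ l → l < arr.length →
      (arr.getD k (0, 0)).1 ≤ (arr.getD l (0, 0)).1)
    (k : Nat) (hk : k < arr.length) (b : Int) :
    (let p := arr.getD k (0, 0)
     let cs := (arr.take k).map Prod.fst
     let lo := pvBisect cs p.1 budget 0 cs.length
     if 0 < lo then max b (p.2 + (pvPreF 0 (arr.take k)).getD (lo - 1) 0) else b)
      = pvStep arr (pvPreF 0 arr) budget b (k : Int) := by
  have hgetP : PySem.List.pyGetD arr ((k : Nat) : Int) (0, 0) = arr.getD k (0, 0) := by
    rw [PySem.List.pyGetD_natCast]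
  set ci := (arr.getD k (0, 0)).1 with hci
  set bnd := pvBnd arr budget ci with hbnd
  set m := min bnd k with hm
  have hcslen : ((arr.take k).map Prod.fst).length = k := by
    simp [List.length_take]; omega
  have hcs : ∀ j : Nat, j < k → ((arr.take k).map Prod.fst).getD j 0 = (arr.getD j (0, 0)).1 := by
    intro j hj
    rw [pv_getD_eqI _ j (by omega)]
    simp only [List.getElem_map, List.getElem_take]
    rw [pv_getD_eq arr j (by omega)]
  have htrue : ∀ j, j < m → ((arr.take k).map Prod.fst).getD j 0 + ci < budget := by
    intro j hj
    rw [hcs j (by omega)]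
    exact pv_bnd_true arr budget ci j (by omega)
  have hfalse : ∀ j, m ≤ j → j < ((arr.take k).map Prod.fst).length →
      ¬ ((arr.take k).map Prod.fst).getD j 0 + ci < budget := by
    intro j hjm hjl
    have hjk : j < k := by omega
    have hbj : bnd ≤ j := by omega
    have hbl : bnd < arr.length := by omega
    have hnb : ¬ (arr.getD bnd (0, 0)).1 + ci < budget := by
      have h0 := pv_bnd_false arr budget ci (hbnd ▸ hbl)
      rw [← hbnd] at h0; exact h0
    have hle := hmono bnd j hbj (by omega)
    rw [hcs j hjk]
    omega
  have hlo : pvBisect ((arr.take k).map Prod.fst) ci budget 0 ((arr.take k).map Prod.fst).length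
      = m :=
    pv_bisect_eq _ ci budget m htrue hfalse ((arr.take k).map Prod.fst).length 0 _
      (by omega) (by omega) (by omega) (le_refl _)
  simp only [pvStep, hgetP, ← hci, ← hbnd, hlo]
  by_cases hm0 : m = 0
  · have hidx : ¬ (0 : Int) ≤ min ((bnd : Int) - 1) ((k : Int) - 1) := by
      have : bnd = 0 ∨ k = 0 := by omega
      rcases this with h | h <;> simp [h]
    rw [if_neg hidx]
    simp [hm0]
  · have hidx : (0 : Int) ≤ min ((bnd : Int) - 1) ((k : Int) - 1) := by omega
    rw [if_pos hidx, if_pos (show 0 < m by omega)]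
    have hidxv : min ((bnd : Int) - 1) ((k : Int) - 1) = (((m - 1 : Nat)) : Int) := by
      omega
    have hgpre : PySem.List.pyGetD (pvPreF 0 arr) (min ((bnd : Int) - 1) ((k : Int) - 1)) 0
        = (arr.take m).foldl (fun mm q => max mm q.2) 0 := by
      rw [hidxv, PySem.List.pyGetD_natCast,
        pv_preF_getD arr 0 (m - 1) (by omega)]
      congr 2
      omega
    have hpm : (pvPreF 0 (arr.take k)).getD (m - 1) 0
        = (arr.take m).foldl (fun mm q => max mm q.2) 0 := by
      rw [pv_preF_getD (arr.take k) 0 (m - 1) (by simp [List.length_take]; omega),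
        List.take_take]
      have hmin : min (m - 1 + 1) k = m := by omega
      rw [hmin]
    rw [hgpre, hpm]

-- B's streaming pass, started after k items, equals the pvStep fold over [k, n)
theorem pv_stream (arr : List (Int × Int)) (budget : Int)
    (hmono : ∀ k l : Nat, k ≤ l → l < arr.length →
      (arr.getD k (0, 0)).1 ≤ (arr.getD l (0, 0)).1) :
    ∀ fuel k (b : Int), arr.length - k ≤ fuel → k ≤ arr.length →
      ((arr.drop k).foldl
          (fun (s : Int × List Int × List Int) p =>
            let lo := pvBisect s.2.1 p.1 budget 0 s.2.1.length
            let b2 := if 0 < lo then max s.1 (p.2 + s.2.2.getD (lo - 1) 0) else s.1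
            (b2, s.2.1 ++ [p.1],
             s.2.2 ++ [max (if s.2.2.isEmpty then 0 else PySem.List.pyGetD s.2.2 (-1) 0) p.2]))
          (b, (arr.take k).map Prod.fst, pvPreF 0 (arr.take k))).1
        = (PySem.List.pyRange (k : Int) (arr.length : Int) 1).foldl
            (pvStep arr (pvPreF 0 arr) budget) b := by
  intro fuel
  induction fuel with
  | zero =>
    intro k b hf hk
    have hke : k = arr.length := by omega
    subst hke
    rw [List.drop_length, PySem.List.pyRange_one_eq_nil (le_refl _)]
    simp
  | succ f ih =>
    intro k b hf hk
    by_cases hke : k = arr.length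
    · subst hke
      rw [List.drop_length, PySem.List.pyRange_one_eq_nil (le_refl _)]
      simp
    · have hkl : k < arr.length := by omega
      rw [List.drop_eq_getElem_cons hkl]
      simp only [List.foldl_cons]
      have htk : arr.take k ++ [arr[k]] = arr.take (k + 1) := by
        rw [List.take_add_one, List.getElem?_eq_getElem hkl]
        rfl
      have hcs' : (arr.take k).map Prod.fst ++ [arr[k].1] = (arr.take (k + 1)).map Prod.fst := by
        rw [← htk, List.map_append]
        rfl
      have hpm' : pvPreF 0 (arr.take k)
            ++ [max (if (pvPreF 0 (arr.take k)).isEmpty then 0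
                     else PySem.List.pyGetD (pvPreF 0 (arr.take k)) (-1) 0) arr[k].2]
          = pvPreF 0 (arr.take (k + 1)) := by
        rw [pv_preF_last, ← htk, pv_preF_snoc]
      have hbody := pv_index arr budget hmono k hkl b
      simp only [pv_getD_eq arr k hkl] at hbody
      have hr : PySem.List.pyRange (k : Int) (arr.length : Int) 1
          = (k : Int) :: PySem.List.pyRange ((k : Int) + 1) (arr.length : Int) 1 :=
        PySem.List.pyRange_one_cons (by exact_mod_cast hkl)
      rw [hr]
      simp only [List.foldl_cons]
      rw [← hbody]
      have hc : ((k : Int) + 1) = (((k + 1 : Nat)) : Int) := by push_cast; ring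
      rw [hc, hcs', hpm']
      exact ih (k + 1) _ (by omega) (by omega)

-- ===== VERDICT (by name: the statement is the Claim_ definition above) =====
theorem maxCapacity_spec : Claim_equal_maxCapacity := by
  unfold Claim_equal_maxCapacity Spec_maxCapacity
  intro costs capacity budget _
  simp only [maxCapacity, maxCapacity_alt]
  set arr := PySem.List.sorted2 (costs.zip capacity) Prod.fst Prod.snd with harr
  have hmono : ∀ k l : Nat, k ≤ l → l < arr.length →
      (arr.getD k (0, 0)).1 ≤ (arr.getD l (0, 0)).1 := by
    rw [harr]; exact pv_arr_mono (costs.zip capacity)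
  -- A's first loop
  have h1 := pv_loop1 budget arr [] 0 0
  simp only [List.length_nil, Nat.cast_zero, List.nil_append] at h1
  rw [h1]
  -- the pre list built by A is pvPreF 0 arr
  have hpre : (arr.foldl (fun (s : List Int × Int) p =>
      (s.1 ++ [max s.2 p.2], max s.2 p.2)) ([], 0)).1 = pvPreF 0 arr := by
    rw [pv_pre_general]
    simp
  rw [hpre]
  -- B's streaming pass from the start
  have hB := pv_stream arr budget hmono arr.length 0
      (arr.foldl (fun b p => if p.1 < budget then max b p.2 else b) 0)
      (by omega) (by omega)
  simp only [List.drop_zero, List.take_zero, List.map_nil, pvPreF] at hB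
  rw [hB]
  -- A's second loop: stateful sweep → pvStep fold → upward range
  rcases Nat.eq_zero_or_pos arr.length with hn | hn
  · rw [PySem.List.pyRange_neg_one_eq_nil (by omega),
      PySem.List.pyRange_one_eq_nil (by omega)]
    rfl
  · have hc1 : ((arr.length : Int) - 1) = (((arr.length - 1 : Nat)) : Int) := by omega
    rw [hc1, pv_loop2 arr _ budget (arr.length - 1) (by omega) 0 _ (Nat.zero_le _) hmono,
      pv_reorder]
    have hc2 : (((arr.length - 1 : Nat)) : Int) + 1 = (arr.length : Int) := by omega
    rw [hc2]
    -- extend A's range [1, n) to B's [0, n): pvStep at 0 is the identity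
    have hpeel : PySem.List.pyRange (((0 : Nat)) : Int) ((arr.length : Int)) 1
        = (0 : Int) :: PySem.List.pyRange 1 ((arr.length : Int)) 1 := by
      rw [PySem.List.pyRange_one_cons (by exact_mod_cast hn)]
      norm_num
    rw [hpeel]
    simp only [List.foldl_cons]
    rw [pv_step_zero]
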